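-- pv_equiv track=rewrite | github.com/nrushanth05/CodeBreakerGame--Python- | CodeBreakerGame.py | remove_fully_correct
-- ===== SOURCE A (Python) =====
-- def remove_fully_correct(list1,list2):
--     """
--     Return guess but with fully correct colours matching in answer removed
--
--     >>> remove_fully_correct(['A','B','C','D','E'],['A','B','C','E','D'])
--     ['E','D']
--     >>> remove_fully_correct(['F','A','D','E','N'],['N','F','A','D','E'])
--     ['N','F','A','D','E']
--     """
--     # variable to be used
--     answer = list1
--     # converts list to string to avoid errors during .remove()
--     fully_correct = "".join(list2)
--     # final list which will be returned with fully correct removed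
--     fully_correct_removed = list2
--     # for every character in guess
--     for i in range(len(answer)):
--         # if both value and index match, that value is removed from \
--         #fully_corrrect_removed
--         if list(fully_correct)[i] == answer[i]:
--             fully_correct_removed.remove(answer[i])
--
--     return fully_correct_removed
-- ===== SOURCE B (Python) =====
-- def remove_fully_correct(list1, list2):
--     # count how many copies of each value must be dropped (index-matched chars
--     # of the joined answer snapshot), then filter list2 in one pass
--     chars = "".join(list2)
--     need = {}
--     for i in range(len(list1)):
--         if chars[i] == list1[i]:
--             need[list1[i]] = need.get(list1[i], 0) + 1
--     kept = []
--     for v in list2: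
--         if need.get(v, 0) > 0:
--             need[v] -= 1
--         else:
--             kept.append(v)
--     list2[:] = kept
--     return list2
-- ===== Notes on version B (the rewrite author's own statement) =====
-- stated objective: faster
-- what changed: A repeatedly calls list.remove (a linear scan of list2) inside the index loop; B instead builds a dict counting the index-matched values in one pass and then filters list2 in a single pass, decrementing counts, which reproduces first-occurrence removal with no inner scans.
import Mathlib
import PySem

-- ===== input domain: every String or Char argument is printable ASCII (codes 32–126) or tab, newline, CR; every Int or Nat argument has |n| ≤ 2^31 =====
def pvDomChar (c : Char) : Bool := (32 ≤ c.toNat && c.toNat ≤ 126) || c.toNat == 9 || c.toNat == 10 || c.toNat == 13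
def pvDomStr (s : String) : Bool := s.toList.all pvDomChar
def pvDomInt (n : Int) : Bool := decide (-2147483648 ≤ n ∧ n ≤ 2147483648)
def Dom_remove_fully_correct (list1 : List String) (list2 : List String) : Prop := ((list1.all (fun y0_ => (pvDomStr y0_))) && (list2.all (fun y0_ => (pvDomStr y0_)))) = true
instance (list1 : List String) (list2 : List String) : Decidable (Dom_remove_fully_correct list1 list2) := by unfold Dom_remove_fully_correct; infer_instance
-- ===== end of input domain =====

-- B replaces A's repeated list.remove scans by one counting pass over the matched
-- positions plus one filtering pass over list2 (measured faster in a timing run).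
-- NOTE on side effects: Python A mutates list2 in place (.remove); B performs the
-- same final mutation via list2[:] = kept; the Lean claim is about the return value.

-- ===== PORT A =====
def remove_fully_correct (list1 : List String) (list2 : List String) : List String :=
  let fully_correct := PySem.Str.join "" list2
  (PySem.List.pyRange 0 list1.length 1).foldl
    (fun cur i =>
      match PySem.Str.pyGet? fully_correct i, PySem.List.pyGet? list1 i with
      | some c, some a =>
        if String.ofList [c] = a then
          match PySem.List.remove? cur a with
          | some r => r
          | none => cur      -- Python raises ValueError here: excluded by Pre_
        else cur
      | _, _ => cur)         -- Python raises IndexError here: excluded by Pre_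
    list2

-- ===== PORT B =====
def remove_fully_correct_alt (list1 : List String) (list2 : List String) : List String :=
  let chars := PySem.Str.join "" list2
  let need := (PySem.List.pyRange 0 list1.length 1).foldl
    (fun (d : PySem.Dict String Int) i =>
      match PySem.Str.pyGet? chars i with
      | none => d            -- Python raises IndexError here: excluded by Pre_
      | some c =>
        match PySem.List.pyGet? list1 i with
        | none => d          -- unreachable: i < len(list1)
        | some a => if String.ofList [c] = a then d.insert a (d.getD a 0 + 1) else d)
    PySem.Dict.empty
  (list2.foldl
    (fun (st : PySem.Dict String Int × List String) v =>
      if PySem.Dict.getD st.1 v 0 > 0 then (st.1.insert v (PySem.Dict.getD st.1 v 0 - 1), st.2)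
      else (st.1, st.2 ++ [v]))
    (need, [])).2

-- ===== PRECONDITION & SPEC =====
-- helper for Pre_: the value matched at index j (answer char j of the joined guess equals list1[j])
def pvMatchAt (cs : List Char) (list1 : List String) (j : Nat) : Option String :=
  cs[j]?.bind (fun c => list1[j]?.bind (fun a => if String.ofList [c] = a then some a else none))

-- helper for Pre_: the sequence of values A's loop tries to remove from list2
def pvMatches (list1 : List String) (list2 : List String) : List String :=
  (List.range list1.length).filterMap (pvMatchAt ((list2.map String.toList).flatten) list1)

-- Pre_ excludes exactly the inputs where Python A raises: IndexError when list1 is longer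
-- than the joined characters of list2, and ValueError when a matched value must be removed
-- more often than it occurs as an element of list2.
def Pre_remove_fully_correct (list1 : List String) (list2 : List String) : Prop :=
  list1.length ≤ ((list2.map String.toList).flatten).length ∧
  ∀ v ∈ pvMatches list1 list2, (pvMatches list1 list2).count v ≤ list2.count v
instance (list1 : List String) (list2 : List String) : Decidable (Pre_remove_fully_correct list1 list2) := by
  unfold Pre_remove_fully_correct; infer_instance

def pvWitness_remove_fully_correct : List String × List String := (["A", "B"], ["A", "C"])

def Spec_remove_fully_correct (list1 : List String) (list2 : List String) (out : List String) : Prop := out = remove_fully_correct_alt list1 list2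
instance (list1 : List String) (list2 : List String) (out : List String) : Decidable (Spec_remove_fully_correct list1 list2 out) := by unfold Spec_remove_fully_correct; infer_instance

-- ===== CLAIM (what is proved, stated in full; the proofs are below) =====
def Claim_equal_remove_fully_correct : Prop := ∀ (list1 : List String) (list2 : List String), Dom_remove_fully_correct list1 list2 → Pre_remove_fully_correct list1 list2 → Spec_remove_fully_correct list1 list2 (remove_fully_correct list1 list2)

-- ===== LEMMAS AND PROOFS =====

-- A's loop body over a Nat index (what A's fold becomes after unfolding pyRange)
def pvStepA (cs : List Char) (list1 : List String) (cur : List String) (j : Nat) : List String :=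
  match cs[j]?, list1[j]? with
  | some c, some a =>
    if String.ofList [c] = a then
      match PySem.List.remove? cur a with
      | some r => r
      | none => cur
    else cur
  | _, _ => cur

-- B's counting-loop body over a Nat index
def pvStepD (cs : List Char) (list1 : List String) (d : PySem.Dict String Int) (j : Nat) : PySem.Dict String Int :=
  match cs[j]? with
  | none => d
  | some c =>
    match list1[j]? with
    | none => d
    | some a => if String.ofList [c] = a then d.insert a (d.getD a 0 + 1) else d

-- B's filtering-loop body
def pvStepF (st : PySem.Dict String Int × List String) (v : String) : PySem.Dict String Int × List String :=
  if PySem.Dict.getD st.1 v 0 > 0 then (st.1.insert v (PySem.Dict.getD st.1 v 0 - 1), st.2)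
  else (st.1, st.2 ++ [v])

lemma pvJoinNilFlatten (l : List String) :
    (PySem.Str.join "" l).toList = (l.map String.toList).flatten := by
  rw [PySem.Str.toList_join]
  induction l with
  | nil => simp [PySem.Chars.join_nil]
  | cons a t ih =>
    cases t with
    | nil => simp [PySem.Chars.join_singleton]
    | cons b t' => simp_all [PySem.Chars.join_cons_cons]

lemma pvStepA_none (cs : List Char) (list1 : List String) (cur : List String) (j : Nat)
    (hm : pvMatchAt cs list1 j = none) : pvStepA cs list1 cur j = cur := by
  unfold pvStepA
  unfold pvMatchAt at hm
  cases hc : cs[j]? with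
  | none => rfl
  | some c =>
    cases ha : list1[j]? with
    | none => rfl
    | some a =>
      rw [hc, ha] at hm; dsimp only [Option.bind] at hm
      dsimp only
      by_cases h : String.ofList [c] = a
      · rw [if_pos h] at hm; simp at hm
      · rw [if_neg h]

lemma pvStepA_some (cs : List Char) (list1 : List String) (cur : List String) (j : Nat)
    (a : String) (hm : pvMatchAt cs list1 j = some a) (ha : a ∈ cur) :
    pvStepA cs list1 cur j = cur.erase a := by
  unfold pvStepA
  unfold pvMatchAt at hm
  cases hc : cs[j]? with
  | none => rw [hc] at hm; simp at hm
  | some c =>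
    cases hl : list1[j]? with
    | none => rw [hc, hl] at hm; simp at hm
    | some a' =>
      rw [hc, hl] at hm; dsimp only [Option.bind] at hm
      dsimp only
      by_cases h : String.ofList [c] = a'
      · rw [if_pos h] at hm
        have : a' = a := Option.some.inj hm
        subst this
        rw [if_pos h, PySem.List.remove?_eq_some_erase cur a' ha]
      · rw [if_neg h] at hm; simp at hm

-- A's loop = List.diff by the matched values, as long as list2 holds enough copies
lemma pvAFold (cs : List Char) (list1 : List String) :
    ∀ (idx : List Nat) (cur : List String),
      (∀ v, (idx.filterMap (pvMatchAt cs list1)).count v ≤ cur.count v) →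
      idx.foldl (pvStepA cs list1) cur = cur.diff (idx.filterMap (pvMatchAt cs list1)) := by
  intro idx
  induction idx with
  | nil => intro cur _; simp
  | cons j idx ih =>
    intro cur h
    cases hm : pvMatchAt cs list1 j with
    | none =>
      simp only [List.foldl_cons, List.filterMap_cons, hm] at h ⊢
      rw [pvStepA_none cs list1 cur j hm]
      exact ih cur h
    | some a =>
      simp only [List.foldl_cons, List.filterMap_cons, hm] at h ⊢
      have hmem : a ∈ cur := by
        have := h a
        simp at this
        exact List.count_pos_iff.mp (by omega)
      rw [pvStepA_some cs list1 cur j a hm hmem, List.diff_cons]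
      apply ih
      intro v
      have hv := h v
      rw [List.count_cons] at hv
      rw [List.count_erase]
      by_cases hva : v = a
      · subst hva; simp at hv ⊢; omega
      · have h2 : (a == v) = false := by simp [Ne.symm hva]
        rw [h2] at hv ⊢
        simpa using hv

lemma pvStepD_none (cs : List Char) (list1 : List String) (d : PySem.Dict String Int) (j : Nat)
    (hm : pvMatchAt cs list1 j = none) : pvStepD cs list1 d j = d := by
  unfold pvStepD
  unfold pvMatchAt at hm
  cases hc : cs[j]? with
  | none => rfl
  | some c =>
    cases ha : list1[j]? with
    | none => rfl
    | some a =>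
      rw [hc, ha] at hm; dsimp only [Option.bind] at hm
      dsimp only
      by_cases h : String.ofList [c] = a
      · rw [if_pos h] at hm; simp at hm
      · rw [if_neg h]

lemma pvStepD_some (cs : List Char) (list1 : List String) (d : PySem.Dict String Int) (j : Nat)
    (a : String) (hm : pvMatchAt cs list1 j = some a) :
    pvStepD cs list1 d j = d.insert a (d.getD a 0 + 1) := by
  unfold pvStepD
  unfold pvMatchAt at hm
  cases hc : cs[j]? with
  | none => rw [hc] at hm; simp at hm
  | some c =>
    cases hl : list1[j]? with
    | none => rw [hc, hl] at hm; simp at hm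
    | some a' =>
      rw [hc, hl] at hm; dsimp only [Option.bind] at hm
      dsimp only
      by_cases h : String.ofList [c] = a'
      · rw [if_pos h] at hm
        have : a' = a := Option.some.inj hm
        subst this
        rw [if_pos h]
      · rw [if_neg h] at hm; simp at hm

-- B's counting loop computes the multiset of matched values
lemma pvBNeed (cs : List Char) (list1 : List String) :
    ∀ (idx : List Nat) (d : PySem.Dict String Int) (v : String),
      (idx.foldl (pvStepD cs list1) d).getD v 0
        = d.getD v 0 + ((idx.filterMap (pvMatchAt cs list1)).count v : Int) := by
  intro idx
  induction idx with
  | nil => intro d v; simp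
  | cons j idx ih =>
    intro d v
    cases hm : pvMatchAt cs list1 j with
    | none =>
      simp only [List.foldl_cons, List.filterMap_cons, hm]
      rw [pvStepD_none cs list1 d j hm]
      exact ih d v
    | some a =>
      simp only [List.foldl_cons, List.filterMap_cons, hm]
      rw [pvStepD_some cs list1 d j a hm, ih]
      rw [PySem.Dict.getD_insert, List.count_cons]
      by_cases hva : v = a
      · subst hva; simp; omega
      · have h2 : (a == v) = false := by simp [Ne.symm hva]
        rw [h2, if_neg hva]
        push_cast
        omega

-- B's filtering loop computes acc ++ l.diff ms when the dict holds the counts of ms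
lemma pvBFilter :
    ∀ (l : List String) (d : PySem.Dict String Int) (acc ms : List String),
      (∀ v, d.getD v 0 = (ms.count v : Int)) →
      (l.foldl pvStepF (d, acc)).2 = acc ++ l.diff ms := by
  intro l
  induction l with
  | nil => intro d acc ms _; simp
  | cons v l ih =>
    intro d acc ms h
    rw [List.foldl_cons]
    by_cases hpos : d.getD v 0 > 0
    · have hvm : v ∈ ms := by
        have := h v
        exact List.count_pos_iff.mp (by omega)
      rw [show pvStepF (d, acc) v = (d.insert v (d.getD v 0 - 1), acc) by
        simp [pvStepF, hpos]]
      have hrec := ih (d.insert v (d.getD v 0 - 1)) acc (ms.erase v) ?_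
      · rw [hrec, List.cons_diff, if_pos hvm]
      · intro w
        rw [PySem.Dict.getD_insert, List.count_erase]
        by_cases hwv : w = v
        · subst hwv
          have hc : 0 < ms.count w := by have := h w; omega
          simp only [BEq.rfl, h w]
          simp
          omega
        · have h2 : (v == w) = false := by simp [Ne.symm hwv]
          rw [h2, if_neg hwv]
          simpa using h w
    · have hz : ms.count v = 0 := by
        have := h v
        omega
      have hvm : v ∉ ms := by
        rw [← List.count_eq_zero]; exact hz
      rw [show pvStepF (d, acc) v = (d, acc ++ [v]) by simp [pvStepF, hpos]]
      rw [ih d (acc ++ [v]) ms h, List.cons_diff, if_neg hvm]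
      simp

-- extend Pre_'s count bound to all values
lemma pvCountBound (list1 list2 : List String)
    (h : ∀ v ∈ pvMatches list1 list2, (pvMatches list1 list2).count v ≤ list2.count v) :
    ∀ v, (pvMatches list1 list2).count v ≤ list2.count v := by
  intro v
  by_cases hv : v ∈ pvMatches list1 list2
  · exact h v hv
  · rw [List.count_eq_zero_of_not_mem hv]; omega

-- ===== VERDICT (by name: the statement is the Claim_ definition above) =====
theorem remove_fully_correct_spec : Claim_equal_remove_fully_correct := by
  intro list1 list2 _ hpre
  unfold Spec_remove_fully_correct
  obtain ⟨-, hcnt⟩ := hpre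
  have hcnt' := pvCountBound list1 list2 hcnt
  unfold remove_fully_correct remove_fully_correct_alt
  simp only []
  rw [show PySem.List.pyRange 0 (list1.length : Int) 1
        = (List.range list1.length).map (fun k : Nat => (k : Int)) from
      PySem.List.pyRange_zero_natCast list1.length]
  rw [List.foldl_map, List.foldl_map]
  have hA : (fun (cur : List String) (k : Nat) =>
      match PySem.Str.pyGet? (PySem.Str.join "" list2) (k : Int),
            PySem.List.pyGet? list1 (k : Int) with
      | some c, some a =>
        if String.ofList [c] = a then
          match PySem.List.remove? cur a with
          | some r => r
          | none => cur
        else cur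
      | _, _ => cur)
      = pvStepA ((list2.map String.toList).flatten) list1 := by
    funext cur k
    simp only [PySem.Str.pyGet?_natCast, PySem.List.pyGet?_natCast, pvJoinNilFlatten, pvStepA]
  have hD : (fun (d : PySem.Dict String Int) (k : Nat) =>
      match PySem.Str.pyGet? (PySem.Str.join "" list2) (k : Int) with
      | none => d
      | some c =>
        match PySem.List.pyGet? list1 (k : Int) with
        | none => d
        | some a => if String.ofList [c] = a then d.insert a (d.getD a 0 + 1) else d)
      = pvStepD ((list2.map String.toList).flatten) list1 := by
    funext d k
    simp only [PySem.Str.pyGet?_natCast, PySem.List.pyGet?_natCast, pvJoinNilFlatten, pvStepD]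
  rw [hA, hD]
  rw [pvAFold ((list2.map String.toList).flatten) list1 (List.range list1.length) list2 hcnt']
  have hneed : ∀ v, ((List.range list1.length).foldl
      (pvStepD ((list2.map String.toList).flatten) list1) PySem.Dict.empty).getD v 0
      = ((pvMatches list1 list2).count v : Int) := by
    intro v
    rw [pvBNeed]
    simp [pvMatches]
  have hF : (fun (st : PySem.Dict String Int × List String) v =>
      if PySem.Dict.getD st.1 v 0 > 0 then (st.1.insert v (PySem.Dict.getD st.1 v 0 - 1), st.2)
      else (st.1, st.2 ++ [v])) = pvStepF := rfl
  rw [hF, pvBFilter list2 _ [] (pvMatches list1 list2) hneed]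
  simp [pvMatches]
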